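-- pv_equiv track=rewrite | github.com/royayushkr/Youtube-IP-V6 | src/services/outliers_finder.py | _duration_bucket_for_seconds
-- ===== SOURCE A (Python) =====
-- from typing import Any, Dict, Iterable, List, Mapping, Optional, Sequence, Tuple
--
-- DURATION_BUCKETS: Dict[str, Tuple[Optional[int], Optional[int]]] = {
--     "Any": (None, None),
--     "Shorts (<=60s)": (0, 60),
--     "1-4 min": (61, 4 * 60),
--     "4-12 min": (4 * 60 + 1, 12 * 60),
--     "12-30 min": (12 * 60 + 1, 30 * 60),
--     "30+ min": (30 * 60 + 1, None),
-- }
--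
-- def _duration_bucket_for_seconds(duration_seconds: int) -> str:
--     if duration_seconds <= 0:
--         return "Unknown"
--     for label, (minimum, maximum) in DURATION_BUCKETS.items():
--         if label == "Any":
--             continue
--         lower_bound = minimum or 0
--         if duration_seconds < lower_bound:
--             continue
--         if maximum is not None and duration_seconds > maximum:
--             continue
--         return label
--     return "30+ min"
-- ===== SOURCE B (Python) =====
-- def _duration_bucket_for_seconds(duration_seconds: int) -> str:
--     if duration_seconds <= 0:
--         return "Unknown"
--     if duration_seconds <= 60:
--         return "Shorts (<=60s)"
--     if duration_seconds <= 240: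
--         return "1-4 min"
--     if duration_seconds <= 720:
--         return "4-12 min"
--     if duration_seconds <= 1800:
--         return "12-30 min"
--     return "30+ min"
-- ===== Notes on version B (the rewrite author's own statement) =====
-- stated objective: idiomatic
-- what changed: Replaced the table-driven loop over the DURATION_BUCKETS dict (with lower/upper bound checks and 'Any' skipping) by a flat ordered if-cascade on upper thresholds only, relying on the buckets being contiguous.
import Mathlib
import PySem

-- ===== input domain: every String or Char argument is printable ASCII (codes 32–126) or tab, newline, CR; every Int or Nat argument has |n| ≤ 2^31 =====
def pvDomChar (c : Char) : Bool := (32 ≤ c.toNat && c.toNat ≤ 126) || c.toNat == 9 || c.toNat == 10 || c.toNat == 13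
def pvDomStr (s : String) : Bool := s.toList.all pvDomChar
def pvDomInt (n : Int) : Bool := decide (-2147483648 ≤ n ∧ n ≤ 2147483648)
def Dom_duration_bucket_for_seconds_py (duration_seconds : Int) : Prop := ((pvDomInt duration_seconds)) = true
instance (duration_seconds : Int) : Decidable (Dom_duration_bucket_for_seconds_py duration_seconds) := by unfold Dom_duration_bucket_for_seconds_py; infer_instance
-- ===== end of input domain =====

-- B replaces A's loop over the DURATION_BUCKETS table by a flat if-cascade on upper thresholds (idiomatic; same cost).

-- ===== PORT A =====
-- the DURATION_BUCKETS dict as an association list in insertion order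
def pvDurationBuckets : List (String × (Option Int × Option Int)) :=
  [("Any", (none, none)),
   ("Shorts (<=60s)", (some 0, some 60)),
   ("1-4 min", (some 61, some 240)),
   ("4-12 min", (some 241, some 720)),
   ("12-30 min", (some 721, some 1800)),
   ("30+ min", (some 1801, none))]

-- the for-loop over DURATION_BUCKETS.items() with its continue/return logic
def pvBucketLoop (duration_seconds : Int) : List (String × (Option Int × Option Int)) → String
  | [] => "30+ min"
  | (label, (minimum, maximum)) :: rest =>
    if label == "Any" then pvBucketLoop duration_seconds rest
    else
      -- 'minimum or 0': None and 0 are falsy in Python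
      let lower_bound : Int := match minimum with
        | none => 0
        | some m => if m == 0 then 0 else m
      if duration_seconds < lower_bound then pvBucketLoop duration_seconds rest
      else
        match maximum with
        | some mx => if duration_seconds > mx then pvBucketLoop duration_seconds rest else label
        | none => label

def duration_bucket_for_seconds_py (duration_seconds : Int) : String :=
  if duration_seconds ≤ 0 then "Unknown"
  else pvBucketLoop duration_seconds pvDurationBuckets

-- ===== PORT B =====
def duration_bucket_for_seconds_py_alt (duration_seconds : Int) : String :=
  if duration_seconds ≤ 0 then "Unknown"
  else if duration_seconds ≤ 60 then "Shorts (<=60s)"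
  else if duration_seconds ≤ 240 then "1-4 min"
  else if duration_seconds ≤ 720 then "4-12 min"
  else if duration_seconds ≤ 1800 then "12-30 min"
  else "30+ min"

-- ===== PRECONDITION & SPEC =====
def Spec_duration_bucket_for_seconds_py (duration_seconds : Int) (out : String) : Prop := out = duration_bucket_for_seconds_py_alt duration_seconds
instance (duration_seconds : Int) (out : String) : Decidable (Spec_duration_bucket_for_seconds_py duration_seconds out) := by unfold Spec_duration_bucket_for_seconds_py; infer_instance

-- ===== CLAIM (what is proved, stated in full; the proofs are below) =====
def Claim_equal_duration_bucket_for_seconds_py : Prop := ∀ (duration_seconds : Int), Dom_duration_bucket_for_seconds_py duration_seconds → Spec_duration_bucket_for_seconds_py duration_seconds (duration_bucket_for_seconds_py duration_seconds)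

-- ===== LEMMAS AND PROOFS =====

theorem pvBucketLoop_nil (d : Int) : pvBucketLoop d [] = "30+ min" := rfl

theorem pvBucketLoop_any (d : Int) (rest : List (String × (Option Int × Option Int))) :
    pvBucketLoop d (("Any", (none, none)) :: rest) = pvBucketLoop d rest := by
  simp [pvBucketLoop]

theorem pvBucketLoop_mid (d : Int) (label : String) (hl : (label == "Any") = false)
    (lo mx : Int) (rest : List (String × (Option Int × Option Int))) :
    pvBucketLoop d ((label, (some lo, some mx)) :: rest) =
      if d < (if lo == 0 then 0 else lo) then pvBucketLoop d rest
      else if d > mx then pvBucketLoop d rest else label := by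
  simp only [pvBucketLoop, hl, Bool.false_eq_true, if_false]

theorem pvBucketLoop_last (d : Int) (label : String) (hl : (label == "Any") = false)
    (lo : Int) (rest : List (String × (Option Int × Option Int))) :
    pvBucketLoop d ((label, (some lo, none)) :: rest) =
      if d < (if lo == 0 then 0 else lo) then pvBucketLoop d rest else label := by
  simp only [pvBucketLoop, hl, Bool.false_eq_true, if_false]

theorem pvBucketLoop_pos (d : Int) (h : ¬ d ≤ 0) :
    pvBucketLoop d pvDurationBuckets =
      (if d ≤ 60 then "Shorts (<=60s)" else if d ≤ 240 then "1-4 min"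
       else if d ≤ 720 then "4-12 min" else if d ≤ 1800 then "12-30 min" else "30+ min") := by
  rw [pvDurationBuckets, pvBucketLoop_any,
     pvBucketLoop_mid d "Shorts (<=60s)" (by decide), pvBucketLoop_mid d "1-4 min" (by decide),
     pvBucketLoop_mid d "4-12 min" (by decide), pvBucketLoop_mid d "12-30 min" (by decide),
     pvBucketLoop_last d "30+ min" (by decide)]
  rw [pvBucketLoop_nil]
  simp only [Int.reduceBEq, if_true]
  by_cases h1 : d ≤ 60
  · simp [show ¬ d < 0 by omega, show ¬ d > 60 by omega, h1]
  · by_cases h2 : d ≤ 240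
    · simp [show ¬ d < 0 by omega, show d > 60 by omega, show ¬ d < 61 by omega,
        show ¬ d > 240 by omega, h1, h2]
    · by_cases h3 : d ≤ 720
      · simp [show ¬ d < 0 by omega, show d > 60 by omega, show ¬ d < 61 by omega,
          show d > 240 by omega, show ¬ d < 241 by omega, show ¬ d > 720 by omega, h1, h2, h3]
      · by_cases h4 : d ≤ 1800
        · simp [show ¬ d < 0 by omega, show d > 60 by omega, show ¬ d < 61 by omega,
            show d > 240 by omega, show ¬ d < 241 by omega, show d > 720 by omega,
            show ¬ d < 721 by omega, show ¬ d > 1800 by omega, h1, h2, h3, h4]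
        · simp [show ¬ d < 0 by omega, show d > 60 by omega, show ¬ d < 61 by omega,
            show d > 240 by omega, show ¬ d < 241 by omega, show d > 720 by omega,
            show ¬ d < 721 by omega, show d > 1800 by omega, show ¬ d < 1801 by omega,
            h1, h2, h3, h4]

-- ===== VERDICT (by name: the statement is the Claim_ definition above) =====
theorem duration_bucket_for_seconds_py_spec : Claim_equal_duration_bucket_for_seconds_py := by
  intro d _
  show duration_bucket_for_seconds_py d = duration_bucket_for_seconds_py_alt d
  unfold duration_bucket_for_seconds_py duration_bucket_for_seconds_py_alt
  by_cases h0 : d ≤ 0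
  · simp [h0]
  · rw [if_neg h0, if_neg h0, pvBucketLoop_pos d h0]
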